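-- pv_equiv track=rewrite | github.com/ATPs/xiaolongTools | WenlinTools.Python3/scripts/readBackedRephasing_withCov.py | determine_contigs
-- ===== SOURCE A (Python) =====
-- def determine_contigs(adict, bad_p):
--     contigs = {}
--     ordered_list = []
--     for scaf in adict:
--         subdict = adict[scaf]
--         count = 1
--         keys = list(subdict.keys())
--         keys.sort()
--         current_contigs = []
--         for index in keys:
--             char1, char2, phase = subdict[index]
--
--             if phase == 'inconsistent':
--                 #found inconsistent phase, skip this positions
--                 #but if there is anything in current_contigs, output it
--                 if len(current_contigs) != 0:
--                     contig_key = '%s_%s' % (scaf, count)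
--                     count += 1
--                     ordered_list.append(contig_key)
--                     contigs[contig_key] = list(current_contigs)
--                     current_contigs = []
--                 continue
--
--
--             if len(current_contigs) == 0:
--                 current_contigs.append((scaf, index, char1, char2, phase))
--                 continue
--             else:
--                 isBreak = False
--                 if (scaf, index) in bad_p:
--                     isBreak = True
--                 else:
--                     current_phase = current_contigs[0][-1]
--                     if phase != current_phase:
--                         isBreak = True
--
--                 if isBreak:
--                     contig_key = '%s_%s' % (scaf, count)
--                     count += 1
--                     ordered_list.append(contig_key)
--                     contigs[contig_key] = list(current_contigs)
--                     current_contigs = [(scaf, index, char1, char2, phase)]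
--                 else:
--                     current_contigs.append((scaf, index, char1, char2, phase))
--         if len(current_contigs) != 0:
--             contig_key = '%s_%s' % (scaf, count)
--             ordered_list.append(contig_key)
--             contigs[contig_key] = list(current_contigs)
--     return contigs, ordered_list
-- ===== SOURCE B (Python) =====
-- def determine_contigs(adict, bad_p):
--     bad = set(bad_p)
--     contigs = {}
--     ordered_list = []
--     for scaf, subdict in adict.items():
--         # pass 1: scan sorted positions once, keep consistent entries tagged
--         # with a boundary flag ("opens a new contig")
--         kept = []
--         run_phase = None          # phase of the entry that opened the current run
--         for index in sorted(subdict):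
--             char1, char2, phase = subdict[index]
--             if phase == 'inconsistent':
--                 run_phase = None  # a skipped position separates contigs
--                 continue
--             new = run_phase is None or (scaf, index) in bad or phase != run_phase
--             kept.append((new, (scaf, index, char1, char2, phase)))
--             if new:
--                 run_phase = phase
--         # pass 2: partition the kept entries at the boundary flags
--         groups = []
--         i = 0
--         while i < len(kept):
--             j = i + 1
--             while j < len(kept) and not kept[j][0]:
--                 j += 1
--             groups.append([e for _, e in kept[i:j]])
--             i = j
--         # pass 3: name each group and emit it
--         for n, g in enumerate(groups, 1):
--             contig_key = '%s_%s' % (scaf, n)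
--             ordered_list.append(contig_key)
--             contigs[contig_key] = g
--     return contigs, ordered_list
-- ===== Notes on version B (the rewrite author's own statement) =====
-- stated objective: alternative
-- what changed: A flushes a mutable current-contig buffer at every break inside one loop; B instead tags each kept entry with a boundary flag in one scan (bad_p turned into a set), partitions the tagged list at the flags in a second pass, and names/emits the groups in a third.
import Mathlib
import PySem

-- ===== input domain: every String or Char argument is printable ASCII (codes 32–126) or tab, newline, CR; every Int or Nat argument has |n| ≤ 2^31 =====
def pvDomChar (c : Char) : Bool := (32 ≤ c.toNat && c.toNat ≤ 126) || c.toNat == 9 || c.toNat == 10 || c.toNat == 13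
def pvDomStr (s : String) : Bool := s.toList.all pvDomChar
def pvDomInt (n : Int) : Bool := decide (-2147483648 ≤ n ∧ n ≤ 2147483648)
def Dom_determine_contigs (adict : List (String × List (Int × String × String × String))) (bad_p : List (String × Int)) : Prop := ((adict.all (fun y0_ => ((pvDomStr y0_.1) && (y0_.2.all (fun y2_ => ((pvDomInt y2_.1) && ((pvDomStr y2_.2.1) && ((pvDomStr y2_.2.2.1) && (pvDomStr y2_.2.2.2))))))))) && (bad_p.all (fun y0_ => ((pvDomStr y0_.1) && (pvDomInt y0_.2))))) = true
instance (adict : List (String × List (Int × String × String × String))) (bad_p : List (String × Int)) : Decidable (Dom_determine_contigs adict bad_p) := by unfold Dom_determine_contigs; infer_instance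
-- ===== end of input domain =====

-- B groups each scaffold's sorted, kept entries by first tagging every entry with a
-- boundary flag in one scan, then partitioning at the flags and naming the groups in a
-- separate pass (objective: alternative decomposition of A's flush-on-break loop;
-- same asymptotic cost, bad_p membership via a set).

-- entry tuple (scaf, index, char1, char2, phase)
abbrev pvE := String × Int × String × String × String

-- '%s_%s' % (scaf, count)
def pvContigKey (scaf : String) (n : Int) : String := scaf ++ "_" ++ PySem.Int.toStr n

-- ===== PORT A =====
-- A's inner-loop state: (contigs, ordered_list, count, current_contigs)
abbrev pvStA := PySem.Dict String (List pvE) × List String × Int × List pvE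

def pvStepA (bad_p : List (String × Int)) (scaf : String)
    (sub : PySem.Dict Int (String × String × String)) (st : pvStA) (index : Int) : pvStA :=
  let contigs := st.1; let ordered := st.2.1; let count := st.2.2.1; let cur := st.2.2.2
  -- subdict[index]; index comes from subdict's own keys, so the lookup always succeeds
  let v := sub.getD index ("", "", "")
  let char1 := v.1; let char2 := v.2.1; let phase := v.2.2
  if phase = "inconsistent" then
    if cur.length ≠ 0 then
      let ck := pvContigKey scaf count
      (contigs.insert ck cur, ordered ++ [ck], count + 1, [])
    else (contigs, ordered, count, cur)
  else if cur.length == 0 then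
    (contigs, ordered, count, cur ++ [(scaf, index, char1, char2, phase)])
  else
    let isBreak :=
      if bad_p.contains (scaf, index) then true
      else
        -- current_contigs[0][-1]
        let current_phase := (PySem.List.pyGetD cur 0 ("", 0, "", "", "")).2.2.2.2
        decide (phase ≠ current_phase)
    if isBreak then
      let ck := pvContigKey scaf count
      (contigs.insert ck cur, ordered ++ [ck], count + 1, [(scaf, index, char1, char2, phase)])
    else (contigs, ordered, count, cur ++ [(scaf, index, char1, char2, phase)])

def pvScafA (bad_p : List (String × Int))
    (st : PySem.Dict String (List pvE) × List String)
    (p : String × List (Int × String × String × String)) :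
    PySem.Dict String (List pvE) × List String :=
  let scaf := p.1
  let sub := PySem.Dict.ofList p.2
  let keys := PySem.List.sorted sub.keys (fun x => x) false
  let r := keys.foldl (pvStepA bad_p scaf sub) (st.1, st.2, (1 : Int), ([] : List pvE))
  if r.2.2.2.length ≠ 0 then
    let ck := pvContigKey scaf r.2.2.1
    (r.1.insert ck r.2.2.2, r.2.1 ++ [ck])
  else (r.1, r.2.1)

def determine_contigs (adict : List (String × List (Int × String × String × String))) (bad_p : List (String × Int)) : (List (String × List (String × Int × String × String × String))) × List String :=
  let r := (PySem.Dict.ofList adict).items.foldl (pvScafA bad_p) (PySem.Dict.empty, [])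
  (r.1.items, r.2)

-- ===== PORT B =====
-- pass 1 step: tag each kept entry with its boundary flag
def pvKeptStep (bad : PySem.Set (String × Int)) (scaf : String)
    (sub : PySem.Dict Int (String × String × String))
    (acc : List (Bool × pvE) × Option String) (index : Int) :
    List (Bool × pvE) × Option String :=
  let kept := acc.1; let runPhase := acc.2
  let v := sub.getD index ("", "", "")
  let char1 := v.1; let char2 := v.2.1; let phase := v.2.2
  if phase = "inconsistent" then (kept, none)
  else
    let isNew := runPhase.isNone || bad.contains (scaf, index) || decide (some phase ≠ runPhase)
    (kept ++ [(isNew, (scaf, index, char1, char2, phase))], if isNew then some phase else runPhase)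

-- pass 2: partition at the boundary flags (the while/while scan of Source B)
def pvChop : List (Bool × pvE) → List (List pvE)
  | [] => []
  | q :: rest =>
    let s := rest.span (fun r => !r.1)
    (q.2 :: s.1.map (·.2)) :: pvChop s.2
termination_by kept => kept.length
decreasing_by
  simp only [List.span_eq_takeWhile_dropWhile, List.length_cons]
  exact Nat.lt_succ_of_le (List.length_dropWhile_le _ _)

def pvScafB (bad : PySem.Set (String × Int))
    (st : PySem.Dict String (List pvE) × List String)
    (p : String × List (Int × String × String × String)) :
    PySem.Dict String (List pvE) × List String :=
  let scaf := p.1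
  let sub := PySem.Dict.ofList p.2
  let keys := PySem.List.sorted sub.keys (fun x => x) false
  let kept := (keys.foldl (pvKeptStep bad scaf sub) ([], none)).1
  let groups := pvChop kept
  -- pass 3: enumerate(groups, 1)
  let r := groups.foldl
    (fun (st2 : PySem.Dict String (List pvE) × List String × Int) g =>
      let ck := pvContigKey scaf st2.2.2
      (st2.1.insert ck g, st2.2.1 ++ [ck], st2.2.2 + 1))
    (st.1, st.2, (1 : Int))
  (r.1, r.2.1)

def determine_contigs_alt (adict : List (String × List (Int × String × String × String))) (bad_p : List (String × Int)) : (List (String × List (String × Int × String × String × String))) × List String :=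
  let bad := PySem.Set.ofList bad_p
  let r := (PySem.Dict.ofList adict).items.foldl (pvScafB bad) (PySem.Dict.empty, [])
  (r.1.items, r.2)

-- ===== PRECONDITION & SPEC =====
def Spec_determine_contigs (adict : List (String × List (Int × String × String × String))) (bad_p : List (String × Int)) (out : (List (String × List (String × Int × String × String × String))) × List String) : Prop := out = determine_contigs_alt adict bad_p
instance (adict : List (String × List (Int × String × String × String))) (bad_p : List (String × Int)) (out : (List (String × List (String × Int × String × String × String))) × List String) : Decidable (Spec_determine_contigs adict bad_p out) := by
  unfold Spec_determine_contigs
  -- instance synthesis hits the answer-size limit on this deeply nested type; build the term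
  exact @instDecidableEqProd _ _
    (@instDecidableEqList _ (@instDecidableEqProd _ _ instDecidableEqString
      (@instDecidableEqList _ (@instDecidableEqProd _ _ instDecidableEqString
        (@instDecidableEqProd _ _ Int.instDecidableEq
          (@instDecidableEqProd _ _ instDecidableEqString
            (@instDecidableEqProd _ _ instDecidableEqString instDecidableEqString)))))))
    (@instDecidableEqList _ instDecidableEqString) out (determine_contigs_alt adict bad_p)

-- ===== CLAIM (what is proved, stated in full; the proofs are below) =====
def Claim_equal_determine_contigs : Prop := ∀ (adict : List (String × List (Int × String × String × String))) (bad_p : List (String × Int)), Dom_determine_contigs adict bad_p → Spec_determine_contigs adict bad_p (determine_contigs adict bad_p)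

-- ===== LEMMAS AND PROOFS =====

-- A's flush loop, rephrased as the list of groups it emits (proof-only helper)
def pvAGroups (bad_p : List (String × Int)) (scaf : String)
    (sub : PySem.Dict Int (String × String × String)) :
    List Int → List pvE → List (List pvE)
  | [], cur => if cur.length ≠ 0 then [cur] else []
  | index :: ks, cur =>
    let v := sub.getD index ("", "", "")
    let char1 := v.1; let char2 := v.2.1; let phase := v.2.2
    if phase = "inconsistent" then
      if cur.length ≠ 0 then cur :: pvAGroups bad_p scaf sub ks []
      else pvAGroups bad_p scaf sub ks cur
    else if cur.length == 0 then
      pvAGroups bad_p scaf sub ks (cur ++ [(scaf, index, char1, char2, phase)])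
    else
      let isBreak :=
        if bad_p.contains (scaf, index) then true
        else decide (phase ≠ (PySem.List.pyGetD cur 0 ("", 0, "", "", "")).2.2.2.2)
      if isBreak then cur :: pvAGroups bad_p scaf sub ks [(scaf, index, char1, char2, phase)]
      else pvAGroups bad_p scaf sub ks (cur ++ [(scaf, index, char1, char2, phase)])

-- B's kept-entry list, as a structural recursion over the keys (proof-only helper)
def pvBKept (bad : PySem.Set (String × Int)) (scaf : String)
    (sub : PySem.Dict Int (String × String × String)) :
    List Int → Option String → List (Bool × pvE)
  | [], _ => []
  | index :: ks, runPhase =>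
    let v := sub.getD index ("", "", "")
    let char1 := v.1; let char2 := v.2.1; let phase := v.2.2
    if phase = "inconsistent" then pvBKept bad scaf sub ks none
    else
      let isNew := runPhase.isNone || bad.contains (scaf, index) || decide (some phase ≠ runPhase)
      (isNew, (scaf, index, char1, char2, phase)) ::
        pvBKept bad scaf sub ks (if isNew then some phase else runPhase)

-- chopping with an already-open partial group g
def pvChopCont (g : List pvE) (kept : List (Bool × pvE)) : List (List pvE) :=
  let s := kept.span (fun r => !r.1)
  (g ++ s.1.map (·.2)) :: pvChop s.2

-- the naming/emitting pass, shared shape of both sides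
def pvEmit (scaf : String) (st : PySem.Dict String (List pvE) × List String × Int)
    (gs : List (List pvE)) : PySem.Dict String (List pvE) × List String :=
  let r := gs.foldl
    (fun (st2 : PySem.Dict String (List pvE) × List String × Int) g =>
      let ck := pvContigKey scaf st2.2.2
      (st2.1.insert ck g, st2.2.1 ++ [ck], st2.2.2 + 1)) st
  (r.1, r.2.1)

lemma pvEmit_cons (scaf : String) (st : PySem.Dict String (List pvE) × List String × Int)
    (g : List pvE) (gs : List (List pvE)) :
    pvEmit scaf st (g :: gs) =
      pvEmit scaf (st.1.insert (pvContigKey scaf st.2.2) g,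
        st.2.1 ++ [pvContigKey scaf st.2.2], st.2.2 + 1) gs := by
  simp [pvEmit]

-- A's end-of-scaffold flush, named so the proofs can treat it atomically
def pvFlush (scaf : String) (r : pvStA) : PySem.Dict String (List pvE) × List String :=
  if r.2.2.2.length ≠ 0 then
    (r.1.insert (pvContigKey scaf r.2.2.1) r.2.2.2, r.2.1 ++ [pvContigKey scaf r.2.2.1])
  else (r.1, r.2.1)

-- A's interleaved flushes equal the emit pass over pvAGroups
lemma lemA (bad_p : List (String × Int)) (scaf : String)
    (sub : PySem.Dict Int (String × String × String)) :
    ∀ (ks : List Int) (c : PySem.Dict String (List pvE)) (o : List String) (n : Int)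
      (cur : List pvE),
      pvFlush scaf (ks.foldl (pvStepA bad_p scaf sub) (c, o, n, cur)) =
      pvEmit scaf (c, o, n) (pvAGroups bad_p scaf sub ks cur) := by
  intro ks
  induction ks with
  | nil =>
    intro c o n cur
    simp only [List.foldl_nil, pvAGroups, pvFlush]
    split
    · simp [pvEmit]
    · simp [pvEmit]
  | cons k ks ih =>
    intro c o n cur
    simp only [List.foldl_cons, pvAGroups, pvStepA]
    split_ifs with h1 h2 h3 h4 <;>
      simp only [ih, pvEmit_cons]

lemma fold_kept (bad : PySem.Set (String × Int)) (scaf : String)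
    (sub : PySem.Dict Int (String × String × String)) :
    ∀ (ks : List Int) (k0 : List (Bool × pvE)) (rp : Option String),
      (ks.foldl (pvKeptStep bad scaf sub) (k0, rp)).1 = k0 ++ pvBKept bad scaf sub ks rp := by
  intro ks
  induction ks with
  | nil => intro k0 rp; simp [pvBKept]
  | cons k ks ih =>
    intro k0 rp
    simp only [List.foldl_cons, pvKeptStep, pvBKept]
    by_cases h1 : (sub.getD k ("", "", "")).2.2 = "inconsistent"
    · simp only [if_pos h1]; rw [ih]
    · simp only [if_neg h1]; rw [ih]; simp

-- the first kept entry after a closed run always opens a new contig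
lemma headFlag (bad : PySem.Set (String × Int)) (scaf : String)
    (sub : PySem.Dict Int (String × String × String)) :
    ∀ (ks : List Int) (q : Bool × pvE) (rest : List (Bool × pvE)),
      pvBKept bad scaf sub ks none = q :: rest → q.1 = true := by
  intro ks
  induction ks with
  | nil => intro q rest h; simp [pvBKept] at h
  | cons k ks ih =>
    intro q rest h
    simp only [pvBKept, Option.isNone_none, Bool.true_or, if_true] at h
    split_ifs at h with h1
    · exact ih _ _ h
    · rw [← (List.cons.inj h).1]

lemma span_head_true (kept : List (Bool × pvE))
    (h : ∀ q rest, kept = q :: rest → q.1 = true) :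
    kept.span (fun r => !r.1) = ([], kept) := by
  cases kept with
  | nil => rfl
  | cons q rest =>
    have := h q rest rfl
    simp [List.span_eq_takeWhile_dropWhile, this]

lemma chop_cons (q : Bool × pvE) (rest : List (Bool × pvE)) :
    pvChop (q :: rest) = pvChopCont [q.2] rest := by
  rw [pvChop, pvChopCont]; rfl

lemma chopCont_cons_false (g : List pvE) (e : pvE) (rest : List (Bool × pvE)) :
    pvChopCont g ((false, e) :: rest) = pvChopCont (g ++ [e]) rest := by
  simp [pvChopCont, List.span_eq_takeWhile_dropWhile]

lemma headPhase_append (g : List pvE) (e : pvE) (hg : g ≠ []) :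
    (PySem.List.pyGetD (g ++ [e]) 0 ("", 0, "", "", "")) =
    (PySem.List.pyGetD g 0 ("", 0, "", "", "")) := by
  cases g with
  | nil => exact absurd rfl hg
  | cons x t =>
    have h1 := PySem.List.pyGetD_natCast (x :: (t ++ [e])) 0 ("", 0, "", "", "")
    have h2 := PySem.List.pyGetD_natCast (x :: t) 0 ("", 0, "", "", "")
    simp only [Nat.cast_zero] at h1 h2
    rw [show x :: t ++ [e] = x :: (t ++ [e]) from rfl, h1, h2]
    rfl

-- key lemma: A's groups are B's chopped kept list
lemma pvHead0 (x : pvE) (t : List pvE) (d : pvE) : PySem.List.pyGetD (x :: t) 0 d = x := by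
  have := PySem.List.pyGetD_natCast (x :: t) 0 d
  simp only [Nat.cast_zero] at this
  rw [this]
  rfl

lemma contains_ofList_eq (l : List (String × Int)) (y : String × Int) :
    PySem.Set.contains (PySem.Set.ofList l) y = l.contains y := by
  by_cases h : y ∈ l <;>
    simp [PySem.Set.contains_eq_listContains, PySem.Set.mem_ofList, h]

lemma chopCont_of_head_true (g : List pvE) (kept : List (Bool × pvE))
    (h : ∀ q rest, kept = q :: rest → q.1 = true) :
    pvChopCont g kept = g :: pvChop kept := by
  unfold pvChopCont
  rw [span_head_true kept h]
  simp

lemma chopCont_cons_true (g : List pvE) (e : pvE) (rest : List (Bool × pvE)) :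
    pvChopCont g ((true, e) :: rest) = g :: pvChopCont [e] rest := by
  have h := chopCont_of_head_true g ((true, e) :: rest) (by intro q r h; cases h; rfl)
  rw [h, chop_cons]

lemma lemAB (bad_p : List (String × Int)) (scaf : String)
    (sub : PySem.Dict Int (String × String × String)) :
    ∀ (ks : List Int),
      (pvAGroups bad_p scaf sub ks [] = pvChop (pvBKept (PySem.Set.ofList bad_p) scaf sub ks none)) ∧
      (∀ (g : List pvE), g ≠ [] →
        pvAGroups bad_p scaf sub ks g =
          pvChopCont g (pvBKept (PySem.Set.ofList bad_p) scaf sub ks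
            (some (PySem.List.pyGetD g 0 ("", 0, "", "", "")).2.2.2.2))) := by
  intro ks
  induction ks with
  | nil =>
    refine ⟨by simp [pvAGroups, pvBKept, pvChop], ?_⟩
    intro g hg
    simp [pvAGroups, pvBKept, pvChopCont, pvChop, hg]
  | cons k ks ih =>
    obtain ⟨ih1, ih2⟩ := ih
    constructor
    · by_cases h1 : (sub.getD k ("", "", "")).2.2 = "inconsistent"
      · simp [pvAGroups, pvBKept, h1, ih1]
      · simp only [pvAGroups, pvBKept, if_neg h1, List.length_nil, ne_eq, not_true_eq_false,
          beq_self_eq_true, if_true, Option.isNone_none, Bool.true_or, List.nil_append,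
          decide_not]
        rw [chop_cons,
          ih2 [(scaf, k, (sub.getD k ("", "", "")).1, (sub.getD k ("", "", "")).2.1,
            (sub.getD k ("", "", "")).2.2)] (by simp), pvHead0]
    · intro g hg
      have hlen : (g.length == 0) = false := by
        simp [List.length_eq_zero_iff, hg]
      by_cases h1 : (sub.getD k ("", "", "")).2.2 = "inconsistent"
      · simp only [pvAGroups, pvBKept, if_pos h1, ne_eq, List.length_eq_zero_iff, hg,
          not_false_eq_true, if_true]
        rw [chopCont_of_head_true g _ (fun q r h => headFlag _ scaf sub ks q r h), ih1]
      · simp only [pvAGroups, pvBKept, if_neg h1, hlen, Bool.false_eq_true, if_false,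
          Option.isNone_some, Bool.false_or, ne_eq, Option.some.injEq]
        rw [contains_ofList_eq]
        by_cases hb : bad_p.contains (scaf, k) = true
        · simp only [hb, if_true, Bool.true_or, if_true]
          rw [chopCont_cons_true,
            ih2 [(scaf, k, (sub.getD k ("", "", "")).1, (sub.getD k ("", "", "")).2.1,
              (sub.getD k ("", "", "")).2.2)] (by simp), pvHead0]
        · simp only [hb, if_false, Bool.false_eq_true, Bool.false_or]
          by_cases hp : (sub.getD k ("", "", "")).2.2 =
              (PySem.List.pyGetD g 0 ("", 0, "", "", "")).2.2.2.2
          · simp only [hp, not_true_eq_false, decide_false, if_false, Bool.false_eq_true]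
            rw [chopCont_cons_false,
              ih2 (g ++ [(scaf, k, (sub.getD k ("", "", "")).1, (sub.getD k ("", "", "")).2.1,
                (PySem.List.pyGetD g 0 ("", 0, "", "", "")).2.2.2.2)]) (by simp),
              headPhase_append _ _ hg]
          · simp only [hp, not_false_eq_true, decide_true, if_true]
            rw [chopCont_cons_true,
              ih2 [(scaf, k, (sub.getD k ("", "", "")).1, (sub.getD k ("", "", "")).2.1,
                (sub.getD k ("", "", "")).2.2)] (by simp), pvHead0]

-- per-scaffold steps agree
lemma scaf_eq (bad_p : List (String × Int))
    (st : PySem.Dict String (List pvE) × List String)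
    (p : String × List (Int × String × String × String)) :
    pvScafA bad_p st p = pvScafB (PySem.Set.ofList bad_p) st p := by
  have hA := lemA bad_p p.1 (PySem.Dict.ofList p.2)
    (PySem.List.sorted (PySem.Dict.ofList p.2).keys (fun x => x) false) st.1 st.2 1 []
  have hK := fold_kept (PySem.Set.ofList bad_p) p.1 (PySem.Dict.ofList p.2)
    (PySem.List.sorted (PySem.Dict.ofList p.2).keys (fun x => x) false) [] none
  have hG := (lemAB bad_p p.1 (PySem.Dict.ofList p.2)
    (PySem.List.sorted (PySem.Dict.ofList p.2).keys (fun x => x) false)).1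
  show pvFlush p.1 (List.foldl (pvStepA bad_p p.1 (PySem.Dict.ofList p.2))
      (st.1, st.2, 1, []) (PySem.List.sorted (PySem.Dict.ofList p.2).keys (fun x => x) false)) =
    pvEmit p.1 (st.1, st.2, 1)
      (pvChop ((List.foldl (pvKeptStep (PySem.Set.ofList bad_p) p.1 (PySem.Dict.ofList p.2))
        ([], none) (PySem.List.sorted (PySem.Dict.ofList p.2).keys (fun x => x) false)).1))
  rw [hA, hK, List.nil_append, hG]

-- ===== VERDICT (by name: the statement is the Claim_ definition above) =====
theorem determine_contigs_spec : Claim_equal_determine_contigs := by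
  intro adict bad_p _
  unfold Spec_determine_contigs determine_contigs determine_contigs_alt
  have h : pvScafA bad_p = pvScafB (PySem.Set.ofList bad_p) := by
    funext st p; exact scaf_eq bad_p st p
  rw [h]
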